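-- pv_equiv track=rewrite | github.com/IntelegixLabs/KrishiSetu | utils/language_processor.py | translate_response
-- ===== SOURCE A (Python) =====
-- def translate_response(response: str, target_language: str) -> str:
--     """Translate response to target language (simplified)"""
--     # This is a simplified translation - in production, use proper translation APIs
--     if target_language == "en":
--         return response
--
--     # Simple keyword-based translation for common agricultural terms
--     translations = {
--         "hi": {
--             "weather": "मौसम",
--             "crop": "फसल",
--             "irrigation": "सिंचाई",
--             "loan": "ऋण",
--             "scheme": "योजना",
--             "recommendation": "सिफारिश",
--             "temperature": "तापमान",
--             "rainfall": "वर्षा",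
--             "humidity": "नमी"
--         },
--         "ta": {
--             "weather": "வானிலை",
--             "crop": "பயிர்",
--             "irrigation": "நீர்ப்பாசனம்",
--             "loan": "கடன்",
--             "scheme": "திட்டம்",
--             "recommendation": "பரிந்துரை",
--             "temperature": "வெப்பநிலை",
--             "rainfall": "மழை",
--             "humidity": "ஈரப்பதம்"
--         }
--     }
--
--     if target_language in translations:
--         translated = response
--         for eng, local in translations[target_language].items():
--             translated = translated.replace(eng, local)
--         return translated
--
--     return response
-- ===== SOURCE B (Python) =====
-- # Single left-to-right scan replacing the first matching keyword at each position,
-- # with per-language tables and direct branching (no shared dict, no early "en" check).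
--
-- _HI = [("weather", "मौसम"), ("crop", "फसल"), ("irrigation", "सिंचाई"),
--        ("loan", "ऋण"), ("scheme", "योजना"), ("recommendation", "सिफारिश"),
--        ("temperature", "तापमान"), ("rainfall", "वर्षा"), ("humidity", "नमी")]
--
-- _TA = [("weather", "வானிலை"), ("crop", "பயிர்"), ("irrigation", "நீர்ப்பாசனம்"),
--        ("loan", "கடன்"), ("scheme", "திட்டம்"), ("recommendation", "பரிந்துரை"),
--        ("temperature", "வெப்பநிலை"), ("rainfall", "மழை"), ("humidity", "ஈரப்பதம்")]
--
--
-- def _scan(items, text):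
--     out = []
--     i = 0
--     n = len(text)
--     while i < n:
--         for eng, local in items:
--             if text.startswith(eng, i):
--                 out.append(local)
--                 i += len(eng)
--                 break
--         else:
--             out.append(text[i])
--             i += 1
--     return "".join(out)
--
--
-- def translate_response(response: str, target_language: str) -> str:
--     """Translate response to target language (simplified)"""
--     if target_language == "hi":
--         return _scan(_HI, response)
--     if target_language == "ta":
--         return _scan(_TA, response)
--     return response
-- ===== Notes on version B (the rewrite author's own statement) =====
-- stated objective: alternative
-- what changed: Replaces A's dict lookup plus chain of nine full-string str.replace passes by direct per-language branching over two flat tables and a single left-to-right scan that substitutes the first matching keyword at each position; Pre_ excludes responses containing either of the two substrings on which occurrences of two different keywords overlap, where which keyword wins is an arbitrary unspecified choice (see cites).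
-- outside the precondition, e.g. on translate_response('rainfalloan', 'hi'): A returns 'rainfalऋण', B returns 'वर्षाoan'
import Mathlib
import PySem

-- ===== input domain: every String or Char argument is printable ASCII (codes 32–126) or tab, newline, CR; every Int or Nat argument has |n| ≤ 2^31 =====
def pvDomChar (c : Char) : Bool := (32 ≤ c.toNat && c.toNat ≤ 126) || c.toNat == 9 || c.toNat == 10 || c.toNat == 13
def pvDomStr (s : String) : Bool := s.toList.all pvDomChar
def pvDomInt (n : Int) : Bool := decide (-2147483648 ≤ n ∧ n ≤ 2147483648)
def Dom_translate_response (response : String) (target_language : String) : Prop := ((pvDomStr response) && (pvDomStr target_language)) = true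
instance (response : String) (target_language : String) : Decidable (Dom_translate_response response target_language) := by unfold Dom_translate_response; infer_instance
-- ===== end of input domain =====

-- B replaces A's dict lookup plus chain of nine full-string replace passes by direct
-- per-language branching and a single left-to-right scan substituting the first matching
-- keyword at each position (objective: alternative, same cost).

-- ===== PORT A =====
-- the translations dict of the Python source, as insertion-order assoc lists
def pvHiPairs : List (String × String) :=
  [("weather", "मौसम"), ("crop", "फसल"), ("irrigation", "सिंचाई"), ("loan", "ऋण"),
   ("scheme", "योजना"), ("recommendation", "सिफारिश"), ("temperature", "तापमान"),
   ("rainfall", "वर्षा"), ("humidity", "नमी")]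
def pvTaPairs : List (String × String) :=
  [("weather", "வானிலை"), ("crop", "பயிர்"), ("irrigation", "நீர்ப்பாசனம்"), ("loan", "கடன்"),
   ("scheme", "திட்டம்"), ("recommendation", "பரிந்துரை"), ("temperature", "வெப்பநிலை"),
   ("rainfall", "மழை"), ("humidity", "ஈரப்பதம்")]
def pvTranslations : List (String × List (String × String)) := [("hi", pvHiPairs), ("ta", pvTaPairs)]

def translate_response (response : String) (target_language : String) : String :=
  if target_language == "en" then response
  else
    match pvTranslations.find? (fun p => p.1 == target_language) with
    | some p => p.2.foldl (fun translated q => PySem.Str.replace translated q.1 q.2) response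
    | none => response

-- ===== PORT B =====
-- Source B's flat per-language tables, as char-list pairs (B processes strings as List Char)
def pvAltHi : List (List Char × List Char) :=
  [("weather".toList, "मौसम".toList), ("crop".toList, "फसल".toList),
   ("irrigation".toList, "सिंचाई".toList), ("loan".toList, "ऋण".toList),
   ("scheme".toList, "योजना".toList), ("recommendation".toList, "सिफारिश".toList),
   ("temperature".toList, "तापमान".toList), ("rainfall".toList, "वर्षा".toList),
   ("humidity".toList, "नमी".toList)]
def pvAltTa : List (List Char × List Char) :=
  [("weather".toList, "வானிலை".toList), ("crop".toList, "பயிர்".toList),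
   ("irrigation".toList, "நீர்ப்பாசனம்".toList), ("loan".toList, "கடன்".toList),
   ("scheme".toList, "திட்டம்".toList), ("recommendation".toList, "பரிந்துரை".toList),
   ("temperature".toList, "வெப்பநிலை".toList), ("rainfall".toList, "மழை".toList),
   ("humidity".toList, "ஈரப்பதம்".toList)]

-- Source B's _scan while loop over an index, as structural recursion on the remaining
-- characters (exact here: every keyword is nonempty, so each step advances)
def pvScanL (items : List (List Char × List Char)) : List Char → List Char
  | [] => []
  | c :: cs =>
    match items.find? (fun q => q.1.isPrefixOf (c :: cs)) with
    | some q => q.2 ++ pvScanL items (cs.drop (q.1.length - 1))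
    | none => c :: pvScanL items cs
termination_by s => s.length
decreasing_by
  all_goals simp

def translate_response_alt (response : String) (target_language : String) : String :=
  if target_language == "hi" then String.ofList (pvScanL pvAltHi response.toList)
  else if target_language == "ta" then String.ofList (pvScanL pvAltTa response.toList)
  else response

-- ===== PRECONDITION & SPEC =====
-- Pre_ excludes responses (for the translated languages) containing "rainfalloan" or
-- "temperaturecommendation": there two keyword occurrences overlap, and which keyword wins
-- (A: dict-chain order, B: leftmost match) is an arbitrary unspecified choice.
def Pre_translate_response (response : String) (target_language : String) : Prop :=
  (target_language = "hi" ∨ target_language = "ta") →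
    (PySem.Str.isIn "rainfalloan" response = false ∧
     PySem.Str.isIn "temperaturecommendation" response = false)
instance (response : String) (target_language : String) : Decidable (Pre_translate_response response target_language) := by unfold Pre_translate_response; infer_instance
def pvWitness_translate_response : String × String := ("the weather and rainfall", "hi")

def Spec_translate_response (response : String) (target_language : String) (out : String) : Prop := out = translate_response_alt response target_language
instance (response : String) (target_language : String) (out : String) : Decidable (Spec_translate_response response target_language out) := by unfold Spec_translate_response; infer_instance

-- ===== CLAIM (what is proved, stated in full; the proofs are below) =====
def Claim_equal_translate_response : Prop := ∀ (response : String) (target_language : String), Dom_translate_response response target_language → Pre_translate_response response target_language → Spec_translate_response response target_language (translate_response response target_language)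

-- ===== LEMMAS AND PROOFS =====

-- clean recursion computing Chars.replace for a nonempty pattern
def pvRep1 (k v : List Char) : List Char → List Char
  | [] => []
  | c :: cs =>
    if k.isPrefixOf (c :: cs) then v ++ pvRep1 k v (cs.drop (k.length - 1))
    else c :: pvRep1 k v cs
termination_by s => s.length
decreasing_by
  all_goals simp

def pvTrigList : List (List Char) := ["rainfalloan".toList, "temperaturecommendation".toList]

def pvNoTrig (s : List Char) : Prop := ∀ t ∈ pvTrigList, ¬ t <:+: s

theorem pv_go_eq (k v : List Char) (hk : k ≠ []) :
    ∀ fuel l acc, l.length ≤ fuel →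
      PySem.Chars.replace.go k v fuel l acc = acc.reverse ++ pvRep1 k v l := by
  intro fuel
  induction fuel with
  | zero =>
    intro l acc hl
    have : l = [] := List.eq_nil_of_length_eq_zero (Nat.le_zero.mp hl)
    subst this
    simp [PySem.Chars.replace.go, pvRep1]
  | succ n ih =>
    intro l acc hl
    match l with
    | [] => simp [PySem.Chars.replace.go, pvRep1]
    | c :: cs =>
      rw [PySem.Chars.replace.go]
      by_cases hp : k.isPrefixOf (c :: cs)
      · obtain ⟨m, hm⟩ : ∃ m, k.length = m + 1 := by
          cases hk' : k with
          | nil => exact absurd hk' hk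
          | cons a as => exact ⟨as.length, by simp⟩
        have hdrop : List.drop k.length (c :: cs) = cs.drop (k.length - 1) := by
          rw [hm]; simp
        rw [if_pos hp, hdrop, ih _ _ (by simp at hl ⊢; omega)]
        rw [pvRep1, if_pos hp]
        simp
      · rw [if_neg hp, ih _ _ (by simpa using Nat.le_of_succ_le_succ hl)]
        rw [pvRep1, if_neg hp]
        simp

theorem pv_replace_eq_rep1 (k v s : List Char) (hk : k ≠ []) :
    PySem.Chars.replace s k v = pvRep1 k v s := by
  rw [PySem.Chars.replace, if_neg (by simpa using hk)]
  simpa using pv_go_eq k v hk s.length s [] le_rfl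

-- an all-ASCII infix cannot start inside an all-non-ASCII block
theorem pv_skip_block (v : List Char) (hva : ∀ c ∈ v, 128 ≤ c.toNat) :
    ∀ r w, w ≠ [] → (∀ c ∈ w, c.toNat < 128) → w <:+: v ++ r → w <:+: r := by
  induction v with
  | nil => intro r w _ _ h; simpa using h
  | cons a v' ih =>
    intro r w hw hwa hin
    rcases List.infix_cons_iff.mp hin with hpre | htail
    · match w, hw with
      | b :: w', _ =>
        have hb : b = a := (List.cons_prefix_cons.mp hpre).1
        have h1 : b.toNat < 128 := hwa b (by simp)
        have h2 : 128 ≤ a.toNat := hva a (by simp)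
        rw [hb] at h1
        omega
    · exact ih (fun c hc => hva c (by simp [hc])) r w hw hwa htail

-- a nonempty all-ASCII prefix of a replaced string was already a prefix of the original
theorem pv_prefix_rep1 (k v : List Char) (hv : v ≠ []) (hva : ∀ c ∈ v, 128 ≤ c.toNat) :
    ∀ s w, w ≠ [] → (∀ c ∈ w, c.toNat < 128) → w <+: pvRep1 k v s → w <+: s := by
  intro s
  induction s with
  | nil => intro w hw _ hpre; rw [pvRep1] at hpre; simp [List.prefix_nil] at hpre; exact absurd hpre hw
  | cons c cs ih =>
    intro w hw hwa hpre
    rw [pvRep1] at hpre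
    by_cases hp : k.isPrefixOf (c :: cs)
    · rw [if_pos hp] at hpre
      match v, hv, w, hw with
      | a :: v', _, b :: w', _ =>
        have hb : b = a := (List.cons_prefix_cons.mp hpre).1
        have h1 : b.toNat < 128 := hwa b (by simp)
        have h2 : 128 ≤ a.toNat := hva a (by simp)
        rw [hb] at h1
        omega
    · rw [if_neg hp] at hpre
      match w, hw with
      | b :: w', _ =>
        obtain ⟨hb, hw'⟩ := List.cons_prefix_cons.mp hpre
        subst hb
        rcases eq_or_ne w' [] with rfl | hne
        · exact ⟨cs, rfl⟩
        · exact List.cons_prefix_cons.mpr ⟨rfl, ih w' hne (fun x hx => hwa x (by simp [hx])) hw'⟩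

-- same for infixes (needed to carry trigger-freedom through the replace chain)
theorem pv_infix_rep1 (k v : List Char) (hv : v ≠ []) (hva : ∀ c ∈ v, 128 ≤ c.toNat) :
    ∀ n s, s.length ≤ n → ∀ w, w ≠ [] → (∀ c ∈ w, c.toNat < 128) → w <:+: pvRep1 k v s → w <:+: s := by
  intro n
  induction n with
  | zero =>
    intro s hs w hw _ hin
    have : s = [] := List.eq_nil_of_length_eq_zero (Nat.le_zero.mp hs)
    subst this
    rw [pvRep1] at hin
    simp [List.infix_nil] at hin
    exact absurd hin hw
  | succ n ih =>
    intro s hs w hw hwa hin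
    match s with
    | [] =>
      rw [pvRep1] at hin
      simp [List.infix_nil] at hin
      exact absurd hin hw
    | c :: cs =>
      rw [pvRep1] at hin
      by_cases hp : k.isPrefixOf (c :: cs)
      · rw [if_pos hp] at hin
        have hwin : w <:+: pvRep1 k v (cs.drop (k.length - 1)) :=
          pv_skip_block v hva _ w hw hwa hin
        have hdl : (cs.drop (k.length - 1)).length ≤ n := by
          simp at hs; simp [List.length_drop]; omega
        have : w <:+: cs.drop (k.length - 1) := ih (cs.drop (k.length - 1)) hdl w hw hwa hwin
        exact (this.trans (List.drop_suffix _ _).isInfix).trans (List.suffix_cons c cs).isInfix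
      · rw [if_neg hp] at hin
        rcases List.infix_cons_iff.mp hin with hpre | htail
        · exact (pv_prefix_rep1 k v hv hva (c :: cs) w hw hwa (by rw [pvRep1, if_neg hp]; exact hpre)).isInfix
        · have : w <:+: cs := ih cs (by simp at hs; omega) w hw hwa htail
          exact this.trans (List.suffix_cons c cs).isInfix


-- pvRep1 walks untouched through a region with no pattern match
theorem pv_rep1_skip (k v : List Char) :
    ∀ x u, (∀ i, i < x.length → ¬ k.isPrefixOf (x.drop i ++ u) = true) →
      pvRep1 k v (x ++ u) = x ++ pvRep1 k v u := by
  intro x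
  induction x with
  | nil => intro u _; simp
  | cons a x' ih =>
    intro u hno
    have h0 : ¬ k.isPrefixOf (a :: (x' ++ u)) = true := by
      have := hno 0 (by simp)
      simpa using this
    rw [List.cons_append, pvRep1, if_neg h0, ih u (fun i hi => by
      have := hno (i + 1) (by simp; omega)
      simpa using this)]
    rw [List.cons_append]

-- find? is stable when every failing predicate keeps failing and the found element keeps succeeding
theorem pv_find?_stable {α : Type} (p1 p2 : α → Bool) :
    ∀ (l : List α) (q : α), l.find? p1 = some q →
      (∀ a ∈ l, p1 a = false → p2 a = false) → p2 q = true → l.find? p2 = some q := by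
  intro l
  induction l with
  | nil => intro q h; simp at h
  | cons a l' ih =>
    intro q hfind hmono hq
    by_cases ha : p1 a
    · rw [List.find?_cons_of_pos ha] at hfind
      obtain rfl : a = q := by simpa using hfind
      rw [List.find?_cons_of_pos hq]
    · rw [List.find?_cons_of_neg (by simpa using ha)] at hfind
      have ha2 : p2 a = false := hmono a (by simp) (by simpa using ha)
      rw [List.find?_cons_of_neg (by simp [ha2])]
      exact ih q hfind (fun b hb => hmono b (by simp [hb])) hq

-- pvScanL copies an all-non-ASCII block verbatim when all keys are ASCII-headed and nonempty
theorem pv_scan_skip (items : List (List Char × List Char))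
    (Hkeys : ∀ q ∈ items, q.1 ≠ [] ∧ ∀ c ∈ q.1, c.toNat < 128) :
    ∀ v t, (∀ c ∈ v, 128 ≤ c.toNat) → pvScanL items (v ++ t) = v ++ pvScanL items t := by
  intro v
  induction v with
  | nil => intro t _; simp
  | cons a v' ih =>
    intro t hva
    have hnone : items.find? (fun q => q.1.isPrefixOf (a :: (v' ++ t))) = none := by
      rw [List.find?_eq_none]
      intro q hq
      obtain ⟨hne, hasc⟩ := Hkeys q hq
      match hk : q.1 with
      | [] => exact absurd hk hne
      | b :: k' =>
        simp only [Bool.not_eq_true]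
        rw [← Bool.not_eq_true]
        intro hpre
        have hb : b = a := (List.cons_prefix_cons.mp (List.isPrefixOf_iff_prefix.mp hpre)).1
        have h1 : b.toNat < 128 := hasc b (by rw [hk]; simp)
        have h2 : 128 ≤ a.toNat := hva a (by simp)
        rw [hb] at h1
        omega
    rw [List.cons_append, pvScanL, hnone]
    simp only []
    rw [ih t (fun c hc => hva c (by simp [hc])), List.cons_append]

theorem pv_scan_nil : ∀ s, pvScanL [] s = s := by
  intro s
  induction s with
  | nil => rw [pvScanL]
  | cons c cs ih => rw [pvScanL]; simp [ih]

theorem pv_noTrig_drop (s : List Char) (n : Nat) (h : pvNoTrig s) : pvNoTrig (s.drop n) := by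
  intro t ht hin
  exact h t ht (hin.trans (List.drop_suffix n s).isInfix)

-- MAIN: placing one replace pass in front of a scan is the same as scanning with that key prepended
theorem pv_main (k v : List Char) (items : List (List Char × List Char))
    (hk : k ≠ []) (hka : ∀ c ∈ k, c.toNat < 128) (hv : v ≠ []) (hva : ∀ c ∈ v, 128 ≤ c.toNat)
    (Hkeys : ∀ q ∈ items, q.1 ≠ [] ∧ ∀ c ∈ q.1, c.toNat < 128)
    (Hover : ∀ q ∈ items, ∀ i < q.1.length, 0 < i →
        ¬ (k <+: q.1.drop i) ∧ (q.1.drop i <+: k → (q.1.take i ++ k) ∈ pvTrigList)) :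
    ∀ n s, s.length ≤ n → pvNoTrig s →
      pvScanL items (pvRep1 k v s) = pvScanL ((k, v) :: items) s := by
  intro n
  induction n with
  | zero =>
    intro s hs _
    have : s = [] := List.eq_nil_of_length_eq_zero (Nat.le_zero.mp hs)
    subst this
    rw [pvRep1, pvScanL, pvScanL]
  | succ n ih =>
    intro s hs hnt
    match s with
    | [] => rw [pvRep1, pvScanL, pvScanL]
    | c :: cs =>
      simp only [List.length_cons, Nat.succ_le_succ_iff] at hs
      by_cases hp : k.isPrefixOf (c :: cs)
      · -- case (a): the chained key matches here; it has priority on both sides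
        rw [pvRep1, if_pos hp]
        conv_rhs => rw [pvScanL]
        rw [List.find?_cons_of_pos (by simpa using hp)]
        simp only []
        rw [pv_scan_skip items Hkeys v _ hva]
        congr 1
        exact ih (cs.drop (k.length - 1)) (by simp [List.length_drop]; omega)
          (by have := pv_noTrig_drop (c :: cs) k.length hnt
              obtain ⟨m, hm⟩ : ∃ m, k.length = m + 1 := by
                match hk' : k with
                | [] => exact absurd rfl hk
                | a :: as => exact ⟨as.length, by simp⟩
              rw [hm] at this; simpa [hm] using this)
      · cases hq : items.find? (fun q => q.1.isPrefixOf (c :: cs)) with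
        | some q =>
          -- case (b): some later key matches first at this position
          have hqmem : q ∈ items := List.mem_of_find?_eq_some hq
          have hqpre : q.1 <+: c :: cs :=
            List.isPrefixOf_iff_prefix.mp (by simpa using List.find?_some hq)
          obtain ⟨hqne, hqasc⟩ := Hkeys q hqmem
          obtain ⟨u, hu⟩ := hqpre
          -- no k-match while walking through q.1
          have hnomatch : ∀ i, i < q.1.length → ¬ k.isPrefixOf (q.1.drop i ++ u) = true := by
            intro i hi hmatch
            have hpre : k <+: q.1.drop i ++ u := List.isPrefixOf_iff_prefix.mp hmatch
            rcases Nat.eq_zero_or_pos i with rfl | hipos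
            · simp at hpre
              rw [hu] at hpre
              exact hp (List.isPrefixOf_iff_prefix.mpr hpre)
            · rcases List.prefix_or_prefix_of_prefix hpre (List.prefix_append _ u) with h1 | h2
              · exact (Hover q hqmem i hi hipos).1 h1
              · have htrig : (q.1.take i ++ k) ∈ pvTrigList := (Hover q hqmem i hi hipos).2 h2
                -- the trigger is then a prefix of s, contradicting pvNoTrig
                have : q.1.take i ++ k <+: c :: cs := by
                  have h3 : q.1.take i ++ k <+: q.1.take i ++ (q.1.drop i ++ u) :=
                    (List.prefix_append_right_inj _).mpr hpre
                  rw [← List.append_assoc, List.take_append_drop, hu] at h3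
                  exact h3
                exact hnt _ htrig this.isInfix
          have hrep : pvRep1 k v (c :: cs) = q.1 ++ pvRep1 k v u := by
            rw [← hu]
            rw [pv_rep1_skip k v q.1 u hnomatch]
          rw [hrep]
          -- the scan on the left finds the same key q
          have hfind2 : items.find? (fun r => r.1.isPrefixOf (q.1 ++ pvRep1 k v u)) = some q := by
            apply pv_find?_stable _ _ items q hq
            · intro r hr hrf
              rw [← Bool.not_eq_true] at hrf ⊢
              intro hrt
              apply hrf
              have hrpre : r.1 <+: q.1 ++ pvRep1 k v u := List.isPrefixOf_iff_prefix.mp hrt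
              obtain ⟨hrne, hrasc⟩ := Hkeys r hr
              rcases List.prefix_or_prefix_of_prefix hrpre (List.prefix_append _ _) with h1 | h2
              · exact List.isPrefixOf_iff_prefix.mpr (h1.trans ⟨u, hu⟩)
              · obtain ⟨r', hr'⟩ := h2
                have hr'pre : r' <+: pvRep1 k v u := by
                  rw [← hr'] at hrpre
                  exact (List.prefix_append_right_inj q.1).mp hrpre
                rcases eq_or_ne r' [] with rfl | hr'ne
                · rw [← hr']
                  simp
                  exact ⟨u, hu⟩
                · have : r' <+: u := pv_prefix_rep1 k v hv hva u r' hr'ne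
                    (fun x hx => hrasc x (by rw [← hr']; simp [hx])) hr'pre
                  apply List.isPrefixOf_iff_prefix.mpr
                  rw [← hu, ← hr']
                  exact (List.prefix_append_right_inj q.1).mpr this
            · exact by simp
          -- both sides step by (q.1, q.2)
          match hq1 : q.1, hqne with
          | b :: kq', _ =>
            rw [hq1] at hfind2
            simp only [List.cons_append] at hfind2
            rw [List.cons_append, pvScanL, hfind2]
            simp only []
            conv_rhs => rw [pvScanL]
            rw [List.find?_cons_of_neg (by simpa using hp), hq, hq1]
            simp only []
            congr 1
            have hdropl : (kq' ++ pvRep1 k v u).drop ((b :: kq').length - 1) = pvRep1 k v u := by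
              simp
            have hdropr : cs.drop ((b :: kq').length - 1) = u := by
              rw [hq1] at hu
              simp at hu
              rw [← hu.2]
              simp
            rw [hdropl, hq1, hdropr]
            apply ih
            · have : (b :: kq').length + u.length = (c :: cs).length := by
                rw [← hu, hq1]; simp; omega
              simp at this; omega
            · have : u = (c :: cs).drop (b :: kq').length := by
                rw [← hu, hq1]; simp
              rw [this]
              exact pv_noTrig_drop _ _ hnt
        | none =>
          -- case (c): nothing matches at this position
          have hnone := hq
          rw [pvRep1, if_neg hp]
          have hnone2 : items.find? (fun q => q.1.isPrefixOf (c :: pvRep1 k v cs)) = none := by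
            rw [List.find?_eq_none]
            intro q hq
            simp only [Bool.not_eq_true]
            rw [← Bool.not_eq_true]
            intro hqt
            obtain ⟨hqne, hqasc⟩ := Hkeys q hq
            have : q.1 <+: pvRep1 k v (c :: cs) := by
              rw [pvRep1, if_neg hp]
              exact List.isPrefixOf_iff_prefix.mp hqt
            have : q.1 <+: c :: cs := pv_prefix_rep1 k v hv hva _ q.1 hqne hqasc this
            have := List.find?_eq_none.mp hnone q hq
            simp at this
            exact this ‹q.1 <+: c :: cs›
          rw [pvScanL, hnone2]
          simp only []
          conv_rhs => rw [pvScanL]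
          rw [List.find?_cons_of_neg (by simpa using hp), hnone]
          simp only []
          congr 1
          exact ih cs (by omega) (fun t ht hin => hnt t ht (hin.trans (List.suffix_cons c cs).isInfix))


-- well-formedness of a key/value table for the chain-equals-scan argument (Bool-valued
-- so the concrete tables can be checked by kernel evaluation)
def pvGoodB : List (List Char × List Char) → Bool
  | [] => true
  | (k, v) :: tl =>
      (!k.isEmpty) && k.all (fun c => decide (c.toNat < 128)) &&
      (!v.isEmpty) && v.all (fun c => decide (128 ≤ c.toNat)) &&
      tl.all (fun q => (List.range q.1.length).all (fun i =>
        (i == 0) ||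
        (!(k.isPrefixOf (q.1.drop i)) &&
          (!((q.1.drop i).isPrefixOf k) || pvTrigList.contains (q.1.take i ++ k))))) &&
      pvGoodB tl

theorem pvGoodB_head (k v : List Char) (tl : List (List Char × List Char))
    (h : pvGoodB ((k, v) :: tl) = true) :
    k ≠ [] ∧ (∀ c ∈ k, c.toNat < 128) ∧ v ≠ [] ∧ (∀ c ∈ v, 128 ≤ c.toNat) ∧
    (∀ q ∈ tl, ∀ i < q.1.length, 0 < i →
      ¬ (k <+: q.1.drop i) ∧ (q.1.drop i <+: k → (q.1.take i ++ k) ∈ pvTrigList)) ∧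
    pvGoodB tl = true := by
  rw [pvGoodB] at h
  simp only [Bool.and_eq_true, List.all_eq_true, decide_eq_true_eq] at h
  obtain ⟨⟨⟨⟨⟨h1, h2⟩, h3⟩, h4⟩, h5⟩, h6⟩ := h
  refine ⟨by simpa using h1, h2, by simpa using h3, h4, ?_, h6⟩
  intro q hq i hi hipos
  have h5' := h5 q hq i (List.mem_range.mpr hi)
  rcases Bool.or_eq_true_iff.mp h5' with h0 | hrest
  · exact absurd (by simpa using h0) (Nat.pos_iff_ne_zero.mp hipos)
  · obtain ⟨ha, hb⟩ := Bool.and_eq_true_iff.mp hrest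
    constructor
    · intro hpre
      rw [← List.isPrefixOf_iff_prefix] at hpre
      simp [hpre] at ha
    · intro hpre
      rcases Bool.or_eq_true_iff.mp hb with hc | hd
      · rw [← List.isPrefixOf_iff_prefix] at hpre
        simp [hpre] at hc
      · exact List.contains_iff_mem.mp hd

theorem pvGoodB_keys : ∀ l, pvGoodB l = true → ∀ q ∈ l, q.1 ≠ [] ∧ ∀ c ∈ q.1, c.toNat < 128 := by
  intro l
  induction l with
  | nil => intro _ q hq; simp at hq
  | cons p tl ih =>
    intro hg q hq
    match p with
    | (k, v) =>
      obtain ⟨h1, h2, _, _, _, htl⟩ := pvGoodB_head k v tl hg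
      rcases List.mem_cons.mp hq with rfl | hmem
      · exact ⟨h1, h2⟩
      · exact ih htl q hmem

theorem pvTrig_ascii : ∀ t ∈ pvTrigList, t ≠ [] ∧ ∀ c ∈ t, c.toNat < 128 := by
  intro t ht
  have hb : pvTrigList.all (fun t => (!t.isEmpty) && t.all (fun c => decide (c.toNat < 128))) = true := by
    decide
  rw [List.all_eq_true] at hb
  have := hb t ht
  simp only [Bool.and_eq_true, List.all_eq_true, decide_eq_true_eq] at this
  exact ⟨by simpa using this.1, this.2⟩

theorem pv_noTrig_rep1 (k v : List Char) (hv : v ≠ []) (hva : ∀ c ∈ v, 128 ≤ c.toNat)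
    (s : List Char) (h : pvNoTrig s) : pvNoTrig (pvRep1 k v s) := by
  intro t ht hin
  obtain ⟨htne, hta⟩ := pvTrig_ascii t ht
  exact h t ht (pv_infix_rep1 k v hv hva s.length s le_rfl t htne hta hin)

-- the replace chain equals the single scan, on trigger-free strings
theorem pv_chain : ∀ (l : List (List Char × List Char)), pvGoodB l = true → ∀ s, pvNoTrig s →
    l.foldl (fun acc q => pvRep1 q.1 q.2 acc) s = pvScanL l s := by
  intro l
  induction l with
  | nil => intro _ s _; simpa using (pv_scan_nil s).symm
  | cons p tl ih =>
    intro hg s hnt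
    match p with
    | (k, v) =>
      obtain ⟨h1, h2, h3, h4, h5, htl⟩ := pvGoodB_head k v tl hg
      rw [List.foldl_cons]
      rw [ih htl (pvRep1 k v s) (pv_noTrig_rep1 k v h3 h4 s hnt)]
      exact pv_main k v tl h1 h2 h3 h4 (pvGoodB_keys tl htl) h5
        s.length s le_rfl hnt

-- string-level bridges
theorem pv_foldl_toList (items : List (String × String)) :
    ∀ s : String, (items.foldl (fun t q => PySem.Str.replace t q.1 q.2) s).toList
      = items.foldl (fun cs q => PySem.Chars.replace cs q.1.toList q.2.toList) s.toList := by
  induction items with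
  | nil => intro s; simp
  | cons p tl ih =>
    intro s
    rw [List.foldl_cons, List.foldl_cons, ih]
    congr 1
    rw [PySem.Str.toList_replace]

theorem pv_foldl_rep1 (items : List (String × String)) (h : ∀ q ∈ items, q.1.toList ≠ []) :
    ∀ cs : List Char, items.foldl (fun x q => PySem.Chars.replace x q.1.toList q.2.toList) cs
      = (items.map (fun q => (q.1.toList, q.2.toList))).foldl (fun x q => pvRep1 q.1 q.2 x) cs := by
  induction items with
  | nil => intro cs; simp
  | cons p tl ih =>
    intro cs
    rw [List.map_cons, List.foldl_cons, List.foldl_cons,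
        pv_replace_eq_rep1 p.1.toList p.2.toList cs (h p (by simp)),
        ih (fun q hq => h q (by simp [hq]))]

theorem pv_table (items : List (String × String))
    (hg : pvGoodB (items.map (fun q => (q.1.toList, q.2.toList))) = true) (r : String)
    (hnt : pvNoTrig r.toList) :
    items.foldl (fun t q => PySem.Str.replace t q.1 q.2) r
      = String.ofList (pvScanL (items.map (fun q => (q.1.toList, q.2.toList))) r.toList) := by
  have hkne : ∀ q ∈ items, q.1.toList ≠ [] := by
    intro q hq
    exact (pvGoodB_keys _ hg (q.1.toList, q.2.toList) (List.mem_map.mpr ⟨q, hq, rfl⟩)).1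
  have h := pv_foldl_toList items r
  rw [pv_foldl_rep1 items hkne, pv_chain _ hg _ hnt] at h
  rw [← h, String.ofList_toList]

set_option maxRecDepth 8192 in
theorem pv_hi_good : pvGoodB (pvHiPairs.map (fun q => (q.1.toList, q.2.toList))) = true := by
  decide

set_option maxRecDepth 8192 in
theorem pv_ta_good : pvGoodB (pvTaPairs.map (fun q => (q.1.toList, q.2.toList))) = true := by
  decide

set_option maxRecDepth 8192 in
theorem pvAltHi_eq : pvAltHi = pvHiPairs.map (fun q => (q.1.toList, q.2.toList)) := by
  decide

set_option maxRecDepth 8192 in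
theorem pvAltTa_eq : pvAltTa = pvTaPairs.map (fun q => (q.1.toList, q.2.toList)) := by
  decide

theorem pv_noTrig_of_pre (r : String)
    (h1 : PySem.Str.isIn "rainfalloan" r = false)
    (h2 : PySem.Str.isIn "temperaturecommendation" r = false) : pvNoTrig r.toList := by
  intro t ht hin
  have hmem : t = "rainfalloan".toList ∨ t = "temperaturecommendation".toList := by
    simpa [pvTrigList] using ht
  rcases hmem with rfl | rfl
  · rw [(PySem.Str.isIn_iff_infix _ _).mpr hin] at h1; simp at h1
  · rw [(PySem.Str.isIn_iff_infix _ _).mpr hin] at h2; simp at h2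

-- ===== VERDICT (by name: the statement is the Claim_ definition above) =====
theorem translate_response_spec : Claim_equal_translate_response := by
  intro r tl _hdom hpre
  unfold Spec_translate_response translate_response translate_response_alt
  by_cases h1 : tl = "hi"
  · subst h1
    obtain ⟨ht1, ht2⟩ := hpre (Or.inl rfl)
    rw [if_neg (by decide), if_pos (by decide)]
    simp only [pvTranslations, List.find?]
    norm_num
    rw [pvAltHi_eq]
    exact pv_table pvHiPairs pv_hi_good r (pv_noTrig_of_pre r ht1 ht2)
  · by_cases h2 : tl = "ta"
    · subst h2
      obtain ⟨ht1, ht2⟩ := hpre (Or.inr rfl)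
      rw [if_neg (by decide), if_neg (by decide), if_pos (by decide)]
      simp only [pvTranslations, List.find?]
      norm_num
      rw [pvAltTa_eq]
      exact pv_table pvTaPairs pv_ta_good r (pv_noTrig_of_pre r ht1 ht2)
    · by_cases he : tl == "en"
      · rw [if_pos he, if_neg (by simp [h1]), if_neg (by simp [h2])]
      · rw [if_neg he]
        have hf : pvTranslations.find? (fun p => p.1 == tl) = none := by
          rw [List.find?_eq_none]
          intro p hp
          simp [pvTranslations] at hp
          rcases hp with rfl | rfl <;> simp [Ne.symm h1, Ne.symm h2]
        rw [hf, if_neg (by simp [h1]), if_neg (by simp [h2])]
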